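-- pv_equiv track=rewrite | github.com/KarolusD/codewars | StantonMeasure/StantonMeasure.py | stanton_measure
-- ===== SOURCE A (Python) =====
-- def stanton_measure(arr):
--     counter_1=0
--     counter_2=0
--     for i in range(0,len(arr)):
--         if arr[i]==1:
--             counter_1+=1
--
--     for i in range(0,len(arr)):
--         if arr[i]==counter_1:
--             counter_2+=1
--
--
--     return counter_2
-- ===== SOURCE B (Python) =====
-- import bisect
--
-- def stanton_measure(arr):
--     # Sort once, then answer both "how many 1s" and "how many elements equal
--     # that count" as bracket widths [bisect_left, bisect_right) in the sorted list.
--     s = sorted(arr)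
--     ones = bisect.bisect_right(s, 1) - bisect.bisect_left(s, 1)
--     return bisect.bisect_right(s, ones) - bisect.bisect_left(s, ones)
-- ===== Notes on version B (the rewrite author's own statement) =====
-- stated objective: alternative
-- what changed: B sorts the list once and obtains both the number of 1s and the number of elements equal to that count as binary-search bracket widths (bisect_right - bisect_left) in the sorted copy, instead of A's two full linear scans.
import Mathlib
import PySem

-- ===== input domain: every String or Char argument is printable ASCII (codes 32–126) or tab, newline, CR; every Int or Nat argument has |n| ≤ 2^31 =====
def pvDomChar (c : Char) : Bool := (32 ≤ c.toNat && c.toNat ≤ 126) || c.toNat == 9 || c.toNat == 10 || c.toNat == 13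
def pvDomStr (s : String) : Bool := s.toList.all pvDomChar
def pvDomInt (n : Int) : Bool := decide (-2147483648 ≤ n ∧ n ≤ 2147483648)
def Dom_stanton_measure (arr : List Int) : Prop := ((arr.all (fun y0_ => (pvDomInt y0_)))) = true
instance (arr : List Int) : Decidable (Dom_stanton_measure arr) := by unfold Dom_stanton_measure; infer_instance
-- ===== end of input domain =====

-- B replaces A's two linear scans with one sort and two binary-search bracket widths
-- (bisect_right - bisect_left on the sorted copy): an alternative algorithm, return value only.

-- ===== PORT A =====
def stanton_measure (arr : List Int) : Int :=
  let counter_1 : Int :=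
    (PySem.List.pyRange 0 (PySem.List.len arr) 1).foldl
      (fun acc i => if PySem.List.pyGetD arr i 0 == 1 then acc + 1 else acc) 0
  (PySem.List.pyRange 0 (PySem.List.len arr) 1).foldl
    (fun acc i => if PySem.List.pyGetD arr i 0 == counter_1 then acc + 1 else acc) 0

-- ===== PORT B =====
def stanton_measure_alt (arr : List Int) : Int :=
  let s := PySem.List.sorted arr (fun x => x)
  let ones : Int := (PySem.List.bisectRight s 1 : Int) - (PySem.List.bisectLeft s 1 : Int)
  (PySem.List.bisectRight s ones : Int) - (PySem.List.bisectLeft s ones : Int)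

-- ===== PRECONDITION & SPEC =====
def Spec_stanton_measure (arr : List Int) (out : Int) : Prop := out = stanton_measure_alt arr
instance (arr : List Int) (out : Int) : Decidable (Spec_stanton_measure arr out) := by unfold Spec_stanton_measure; infer_instance

-- ===== CLAIM (what is proved, stated in full; the proofs are below) =====
def Claim_equal_stanton_measure : Prop := ∀ (arr : List Int), Dom_stanton_measure arr → Spec_stanton_measure arr (stanton_measure arr)

-- ===== LEMMAS AND PROOFS =====

-- If a predicate holds exactly on the first k positions of a list, its countP is k.
theorem countP_eq_of_index_iff (s : List Int) (p : Int → Bool) (k : Nat) (hk : k ≤ s.length)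
    (h : ∀ j (hj : j < s.length), p s[j] = true ↔ j < k) : s.countP p = k := by
  induction s generalizing k with
  | nil => simp only [List.countP_nil, List.length_nil] at hk ⊢; omega
  | cons a t ih =>
    cases k with
    | zero =>
      have h0 : ∀ b ∈ a :: t, ¬ p b = true := by
        intro b hb
        obtain ⟨j, hj, rfl⟩ := List.mem_iff_getElem.mp hb
        intro hp
        exact absurd ((h j hj).mp hp) (by omega)
      simp [List.countP_eq_zero.mpr h0]
    | succ k' =>
      have ha : p a = true := (h 0 (by simp)).mpr (by omega)
      have ht : t.countP p = k' := by
        refine ih k' (by simpa using hk) ?_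
        intro j hj
        have := h (j + 1) (by simpa using Nat.succ_lt_succ hj)
        simpa using this.trans (by omega)
      simp [ha, ht]

-- countP(≤ x) splits as countP(< x) plus the multiplicity of x.
theorem countP_le_split (s : List Int) (x : Int) :
    s.countP (fun v => decide (v ≤ x)) = s.countP (fun v => decide (v < x)) + List.count x s := by
  induction s with
  | nil => simp
  | cons a t ih =>
    rcases lt_trichotomy a x with h | h | h <;>
      simp [ih, h, le_of_lt, not_le.mpr, ne_of_gt, ne_of_lt] <;>
      omega

-- On a sorted list the bisect bracket width is the multiplicity of x.
theorem bisect_diff_eq_count (s : List Int) (x : Int) (hs : s.Pairwise (· ≤ ·)) :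
    (PySem.List.bisectRight s x : Int) - (PySem.List.bisectLeft s x : Int) = (List.count x s : Int) := by
  obtain ⟨hRlen, hRlt, hRge⟩ := PySem.List.bisectRight_spec s x hs
  obtain ⟨hLlen, hLlt, hLge⟩ := PySem.List.bisectLeft_spec s x hs
  have hR : s.countP (fun v => decide (v ≤ x)) = PySem.List.bisectRight s x := by
    refine countP_eq_of_index_iff s _ _ hRlen ?_
    intro j hj
    simp only [decide_eq_true_eq]
    constructor
    · intro hle
      by_contra hnot
      exact absurd hle (not_le.mpr (hRge j hj (by omega)))
    · exact hRlt j hj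
  have hL : s.countP (fun v => decide (v < x)) = PySem.List.bisectLeft s x := by
    refine countP_eq_of_index_iff s _ _ hLlen ?_
    intro j hj
    simp only [decide_eq_true_eq]
    constructor
    · intro hlt
      by_contra hnot
      exact absurd hlt (not_lt.mpr (hLge j hj (by omega)))
    · exact hLlt j hj
  have := countP_le_split s x
  omega

-- ===== VERDICT (by name: the statement is the Claim_ definition above) =====
-- Both sides equal count (count 1 arr) arr: A via loop-to-count lemmas, B via the bisect lemmas.
theorem stanton_measure_spec : Claim_equal_stanton_measure := by
  intro arr _
  unfold Spec_stanton_measure stanton_measure stanton_measure_alt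
  have hperm := PySem.List.sorted_perm arr (fun x => x) false
  have hpw : (PySem.List.sorted arr (fun x => x)).Pairwise (· ≤ ·) := by
    simpa using PySem.List.sorted_pairwise arr (fun x => x)
  rw [PySem.List.foldl_pyRange_zero_pyGetD arr 0
        (fun acc x => if x == (1:Int) then acc + 1 else acc) 0,
      PySem.List.foldl_beq_add_one]
  rw [PySem.List.foldl_pyRange_zero_pyGetD arr 0
        (fun acc x => if x == (0 + (List.count 1 arr : Int)) then acc + 1 else acc) 0,
      PySem.List.foldl_beq_add_one]
  dsimp only
  rw [bisect_diff_eq_count _ 1 hpw, hperm.count_eq]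
  rw [bisect_diff_eq_count _ _ hpw, hperm.count_eq]
  ring_nf
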